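-- pv_equiv track=rewrite | github.com/ChoiRang/study | pythonProject/leet/hard/2732_Find a Good Subset of the Matrix.py | goodSubsetofBinaryMatrix
-- ===== SOURCE A (Python) =====
-- from typing import List
--
-- def goodSubsetofBinaryMatrix(grid: List[List[int]]) -> List[int]:
-- 	res = []
--
-- 	for idx, row in enumerate(grid):
-- 		total = sum(1 << i for i, x in enumerate(row) if x)
-- 		if total == 0: return [idx]
-- 		for i in range(len(res)):
-- 			if total & res[i] == 0:
-- 				return [i, idx]
-- 		res.append(total)
--
-- 	return []
-- ===== SOURCE B (Python) =====
-- def goodSubsetofBinaryMatrix(grid):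
--     masks = [sum(1 << i for i, x in enumerate(row) if x) for row in grid]
--     frontier = []  # antichain: subset-minimal masks seen so far; every seen mask is a superset of some frontier mask
--     for i, t in enumerate(masks):
--         if t == 0:
--             return [i]
--         if any(t & f == 0 for f in frontier):
--             # trigger fires at most once per call; the first disjoint position is the minimal partner index
--             j = next((k for k, s in enumerate(masks) if t & s == 0), -1)
--             return [j, i]
--         if not any(f & t == f for f in frontier):
--             frontier = [f for f in frontier if t & f != t] + [t]
--     return []
-- ===== Notes on version B (the rewrite author's own statement) =====
-- stated objective: alternative
-- what changed: B precomputes all row bitmasks, replaces A's per-row scan over every previous row by a maintained antichain of subset-minimal seen masks (disjointness with any seen mask is equivalent to disjointness with a frontier mask), and recovers the minimal partner index with a single back-scan over the mask list that runs at most once per call.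
import Mathlib
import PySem

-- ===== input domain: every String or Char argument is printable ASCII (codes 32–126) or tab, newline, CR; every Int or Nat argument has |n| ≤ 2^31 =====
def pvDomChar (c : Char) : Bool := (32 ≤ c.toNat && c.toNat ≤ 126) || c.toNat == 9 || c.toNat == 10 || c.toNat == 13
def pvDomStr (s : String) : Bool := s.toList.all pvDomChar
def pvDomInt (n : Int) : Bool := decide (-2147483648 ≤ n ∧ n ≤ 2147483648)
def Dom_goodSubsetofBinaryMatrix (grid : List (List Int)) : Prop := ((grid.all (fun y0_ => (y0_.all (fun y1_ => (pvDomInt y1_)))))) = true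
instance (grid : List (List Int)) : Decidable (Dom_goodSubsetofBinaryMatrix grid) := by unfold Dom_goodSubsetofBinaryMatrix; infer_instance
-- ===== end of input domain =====

-- B replaces A's per-row scan over all previous rows by an antichain of subset-minimal
-- seen masks plus a single once-per-call back-scan for the minimal partner index.

-- shared helper: total = sum(1 << i for i, x in enumerate(row) if x)
def rowMask (row : List Int) : Int :=
  (PySem.List.enumerate row).foldl
    (fun (s : Int) (p : Int × Int) => if p.2 ≠ 0 then s + ((1 : Int) <<< p.1.toNat) else s) 0

-- ===== PORT A =====
-- for i in range(len(res)): if total & res[i] == 0: return [i, idx]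
def findDisjoint (res : List Int) (total : Int) (i : Int) : Option Int :=
  match res with
  | [] => none
  | r :: rs => if PySem.Int.band total r = 0 then some i else findDisjoint rs total (i + 1)

def goA : List (List Int) → Int → List Int → List Int
  | [], _, _ => []
  | row :: rest, idx, res =>
    let total := rowMask row
    if total = 0 then [idx]
    else
      match findDisjoint res total 0 with
      | some i => [i, idx]
      | none => goA rest (idx + 1) (res ++ [total])

def goodSubsetofBinaryMatrix (grid : List (List Int)) : List Int := goA grid 0 []

-- ===== PORT B =====
-- j = next((k for k, s in enumerate(masks) if t & s == 0), -1)
def scanFirst (t : Int) : List (Int × Int) → Option Int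
  | [] => none
  | (k, s) :: rest => if PySem.Int.band t s = 0 then some k else scanFirst t rest

-- for i, t in enumerate(masks): …  (masks carried along for the one back-scan)
def goBLoop (masks : List Int) : List (Int × Int) → List Int → List Int
  | [], _ => []
  | (i, t) :: rest, frontier =>
    if t = 0 then [i]
    else if frontier.any (fun f => PySem.Int.band t f == 0) then
      [(scanFirst t (PySem.List.enumerate masks)).getD (-1), i]
    else
      goBLoop masks rest
        (if frontier.any (fun f => PySem.Int.band f t == f) then frontier
         else frontier.filter (fun f => PySem.Int.band t f ≠ t) ++ [t])

def goodSubsetofBinaryMatrix_alt (grid : List (List Int)) : List Int :=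
  let masks := grid.map rowMask
  goBLoop masks (PySem.List.enumerate masks) []

-- ===== PRECONDITION & SPEC =====
def Spec_goodSubsetofBinaryMatrix (grid : List (List Int)) (out : List Int) : Prop := out = goodSubsetofBinaryMatrix_alt grid
instance (grid : List (List Int)) (out : List Int) : Decidable (Spec_goodSubsetofBinaryMatrix grid out) := by unfold Spec_goodSubsetofBinaryMatrix; infer_instance

-- ===== CLAIM (what is proved, stated in full; the proofs are below) =====
def Claim_equal_goodSubsetofBinaryMatrix : Prop := ∀ (grid : List (List Int)), Dom_goodSubsetofBinaryMatrix grid → Spec_goodSubsetofBinaryMatrix grid (goodSubsetofBinaryMatrix grid)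

-- ===== LEMMAS AND PROOFS =====

-- first index (counting from k) whose element satisfies p
def firstIdx (p : Int → Bool) : List Int → Int → Option Int
  | [], _ => none
  | r :: rs, k => if p r then some k else firstIdx p rs (k + 1)

theorem findDisjoint_eq (res : List Int) (t i : Int) :
    findDisjoint res t i = firstIdx (fun r => PySem.Int.band t r == 0) res i := by
  induction res generalizing i with
  | nil => rfl
  | cons r rs ih =>
    by_cases h : PySem.Int.band t r = 0 <;> simp [findDisjoint, firstIdx, h, ih]

theorem scanFirst_enum (t : Int) (l : List Int) (s : Int) :
    scanFirst t (PySem.List.enumerate l s) = firstIdx (fun r => PySem.Int.band t r == 0) l s := by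
  induction l generalizing s with
  | nil => simp [PySem.List.enumerate_nil, scanFirst, firstIdx]
  | cons r rs ih =>
    rw [PySem.List.enumerate_cons]
    by_cases h : PySem.Int.band t r = 0 <;> simp [scanFirst, firstIdx, h, ih]

theorem firstIdx_none_iff (p : Int → Bool) (l : List Int) (k : Int) :
    firstIdx p l k = none ↔ ∀ r ∈ l, ¬ p r := by
  induction l generalizing k with
  | nil => simp [firstIdx]
  | cons r rs ih =>
    by_cases h : p r <;> simp [firstIdx, h, ih]

theorem firstIdx_some_mem (p : Int → Bool) (l : List Int) (k j : Int)
    (h : firstIdx p l k = some j) : ∃ x ∈ l, p x := by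
  induction l generalizing k with
  | nil => simp [firstIdx] at h
  | cons r rs ih =>
    by_cases hr : p r
    · exact ⟨r, by simp, hr⟩
    · simp [firstIdx, hr] at h
      obtain ⟨x, hx, hpx⟩ := ih (k + 1) h
      exact ⟨x, by simp [hx], hpx⟩

theorem firstIdx_append_of_some (p : Int → Bool) (l l' : List Int) (k j : Int)
    (h : firstIdx p l k = some j) : firstIdx p (l ++ l') k = some j := by
  induction l generalizing k with
  | nil => simp [firstIdx] at h
  | cons r rs ih =>
    by_cases hr : p r <;> simp [firstIdx, hr] at h ⊢
    · exact h
    · exact ih (k + 1) h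

-- Nat bit lemmas
theorem nat_subset_disjoint (f r t : Nat) (h1 : f &&& r = f) (h2 : t &&& r = 0) :
    t &&& f = 0 := by
  apply Nat.eq_of_testBit_eq
  intro i
  simp only [Nat.testBit_and, Nat.zero_testBit]
  have hf : f.testBit i = (f.testBit i && r.testBit i) := by
    conv_lhs => rw [← h1]
    simp [Nat.testBit_and]
  have ht : (t.testBit i && r.testBit i) = false := by
    have := congrArg (fun x => Nat.testBit x i) h2
    simpa [Nat.testBit_and] using this
  cases hti : t.testBit i
  · simp
  · cases hfi : f.testBit i
    · simp
    · exfalso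
      rw [hfi] at hf
      have hr : r.testBit i = true := by
        cases hri : r.testBit i
        · rw [hri] at hf; simp at hf
        · rfl
      rw [hti, hr] at ht
      simp at ht
theorem nat_subset_trans (t f s : Nat) (h1 : t &&& f = t) (h2 : f &&& s = f) :
    t &&& s = t := by
  apply Nat.eq_of_testBit_eq
  intro i
  simp only [Nat.testBit_and]
  have ht : t.testBit i = (t.testBit i && f.testBit i) := by
    conv_lhs => rw [← h1]; simp [Nat.testBit_and]
  have hf : f.testBit i = (f.testBit i && s.testBit i) := by
    conv_lhs => rw [← h2]; simp [Nat.testBit_and]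
  cases hti : t.testBit i
  · simp
  · rw [hti] at ht
    have hfi : f.testBit i = true := by
      cases hfi : f.testBit i
      · rw [hfi] at ht; simp at ht
      · rfl
    rw [hfi] at hf
    have hsi : s.testBit i = true := by
      cases hsi : s.testBit i
      · rw [hsi] at hf; simp at hf
      · rfl
    rw [hsi]
    simp

-- Int versions on nonnegative values, via PySem.Int.band_of_nonneg
theorem band_subset_disjoint (f r t : Int) (hf : 0 ≤ f) (hr : 0 ≤ r) (ht : 0 ≤ t)
    (h1 : PySem.Int.band f r = f) (h2 : PySem.Int.band t r = 0) :
    PySem.Int.band t f = 0 := by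
  rw [PySem.Int.band_of_nonneg hf hr] at h1
  rw [PySem.Int.band_of_nonneg ht hr] at h2
  rw [PySem.Int.band_of_nonneg ht hf]
  have h1' : f.toNat &&& r.toNat = f.toNat := by
    have := congrArg Int.toNat h1; simpa using this
  have h2' : t.toNat &&& r.toNat = 0 := by
    have := congrArg Int.toNat h2; simpa using this
  rw [nat_subset_disjoint f.toNat r.toNat t.toNat h1' h2']
  simp

theorem band_subset_trans (t f s : Int) (ht : 0 ≤ t) (hf : 0 ≤ f) (hs : 0 ≤ s)
    (h1 : PySem.Int.band t f = t) (h2 : PySem.Int.band f s = f) :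
    PySem.Int.band t s = t := by
  rw [PySem.Int.band_of_nonneg ht hf] at h1
  rw [PySem.Int.band_of_nonneg hf hs] at h2
  rw [PySem.Int.band_of_nonneg ht hs]
  have h1' : t.toNat &&& f.toNat = t.toNat := by
    have := congrArg Int.toNat h1; simpa using this
  have h2' : f.toNat &&& s.toNat = f.toNat := by
    have := congrArg Int.toNat h2; simpa using this
  rw [nat_subset_trans t.toNat f.toNat s.toNat h1' h2']
  omega

theorem rowMask_nonneg (row : List Int) : 0 ≤ rowMask row := by
  unfold rowMask
  generalize PySem.List.enumerate row = l
  suffices h : ∀ (l : List (Int × Int)) (a : Int), 0 ≤ a →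
      0 ≤ l.foldl (fun (s : Int) (p : Int × Int) => if p.2 ≠ 0 then s + ((1 : Int) <<< p.1.toNat) else s) a by
    exact h l 0 le_rfl
  intro l
  induction l with
  | nil => intro a ha; simpa using ha
  | cons p ps ih =>
    intro a ha
    rw [List.foldl_cons]
    apply ih
    by_cases hz : p.2 ≠ 0 <;> simp [hz]
    · have : (0:Int) ≤ (1 : Int) <<< p.1.toNat := by
        rw [Int.shiftLeft_eq]
        positivity
      omega
    · exact ha

theorem band_self' (a : Int) : PySem.Int.band a a = a := PySem.Int.band_self a

-- main loop equivalence under the frontier invariant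
theorem go_eq (rows : List (List Int)) :
    ∀ (res frontier : List Int),
      (∀ r ∈ res, 0 ≤ r) →
      (∀ f ∈ frontier, f ∈ res) →
      (∀ s ∈ res, ∃ f ∈ frontier, PySem.Int.band f s = f) →
      goA rows (res.length : Int) res =
        goBLoop (res ++ rows.map rowMask)
          (PySem.List.enumerate (rows.map rowMask) (res.length : Int)) frontier := by
  induction rows with
  | nil =>
    intro res frontier _ _ _
    simp [goA, goBLoop, PySem.List.enumerate_nil]
  | cons row rest ih =>
    intro res frontier hnn hsub hcov
    have htnn : 0 ≤ rowMask row := rowMask_nonneg row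
    rw [List.map_cons, PySem.List.enumerate_cons]
    rw [goA, goBLoop]
    set t := rowMask row with htdef
    by_cases ht0 : t = 0
    · simp [ht0]
    · simp only [ht0, if_false]
      rw [findDisjoint_eq]
      cases hf : firstIdx (fun r => PySem.Int.band t r == 0) res 0 with
      | some j =>
        -- A triggers; show B's any is true and back-scan finds the same j
        obtain ⟨x, hx, hpx⟩ := firstIdx_some_mem _ _ _ _ hf
        simp only [beq_iff_eq] at hpx
        obtain ⟨f, hfmem, hfc⟩ := hcov x hx
        have hany : frontier.any (fun f => PySem.Int.band t f == 0) = true := by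
          rw [List.any_eq_true]
          refine ⟨f, hfmem, ?_⟩
          simp only [beq_iff_eq]
          exact band_subset_disjoint f x t (hnn f (hsub f hfmem)) (hnn x hx) htnn hfc hpx
        rw [hany]
        simp only [if_true]
        rw [scanFirst_enum]
        rw [firstIdx_append_of_some _ _ _ _ _ hf]
        rfl
      | none =>
        -- no disjoint seen mask; B's any is false (frontier ⊆ res)
        have hall := (firstIdx_none_iff _ _ _).mp hf
        have hany : frontier.any (fun f => PySem.Int.band t f == 0) = false := by
          rw [List.any_eq_false]
          intro f hfmem
          simpa using hall f (hsub f hfmem)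
        rw [hany]
        simp only [Bool.false_eq_true, if_false]
        -- recursive case
        have hres' : ∀ r ∈ res ++ [t], 0 ≤ r := by
          intro r hr
          rcases List.mem_append.mp hr with h | h
          · exact hnn r h
          · simp at h; omega
        have hlen : ((res ++ [t]).length : Int) = (res.length : Int) + 1 := by simp
        by_cases hskip : frontier.any (fun f => PySem.Int.band f t == f) = true
        · -- t is a superset of a frontier mask: frontier unchanged
          rw [hskip]; simp only [if_true]
          obtain ⟨f0, hf0, hf0c⟩ := List.any_eq_true.mp hskip
          simp only [beq_iff_eq] at hf0c
          have := ih (res ++ [t]) frontier hres'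
            (fun f hfm => List.mem_append.mpr (Or.inl (hsub f hfm)))
            (fun s hs => by
              rcases List.mem_append.mp hs with h | h
              · exact hcov s h
              · simp at h; subst h; exact ⟨f0, hf0, hf0c⟩)
          rw [hlen] at this
          simpa using this
        · -- add t, pruning seen supersets of t
          rw [Bool.not_eq_true] at hskip
          rw [hskip]; simp only [Bool.false_eq_true, if_false]
          set frontier' := frontier.filter (fun f => PySem.Int.band t f ≠ t) ++ [t] with hfr
          have := ih (res ++ [t]) frontier' hres'
            (fun f hfm => by
              rcases List.mem_append.mp hfm with h | h
              · exact List.mem_append.mpr (Or.inl (hsub f (List.mem_of_mem_filter h)))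
              · simp at h; subst h; simp)
            (fun s hs => by
              rcases List.mem_append.mp hs with h | h
              · obtain ⟨f0, hf0, hf0c⟩ := hcov s h
                by_cases hkeep : PySem.Int.band t f0 ≠ t
                · exact ⟨f0, List.mem_append.mpr (Or.inl (List.mem_filter.mpr ⟨hf0, by simpa using hkeep⟩)), hf0c⟩
                · rw [not_not] at hkeep
                  refine ⟨t, List.mem_append.mpr (Or.inr (by simp)), ?_⟩
                  exact band_subset_trans t f0 s htnn (hnn f0 (hsub f0 hf0)) (hnn s h) hkeep hf0c
              · simp at h; subst h
                exact ⟨t, List.mem_append.mpr (Or.inr (by simp)), band_self' t⟩)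
          rw [hlen] at this
          simpa using this

-- ===== VERDICT (by name: the statement is the Claim_ definition above) =====
theorem goodSubsetofBinaryMatrix_spec : Claim_equal_goodSubsetofBinaryMatrix := by
  intro grid _
  show goodSubsetofBinaryMatrix grid = goodSubsetofBinaryMatrix_alt grid
  have := go_eq grid [] [] (by simp) (by simp) (by simp)
  simpa [goodSubsetofBinaryMatrix, goodSubsetofBinaryMatrix_alt] using this
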